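-- pv_equiv track=rewrite | github.com/themightymuppet/advent | 2020/06.py | customs
-- ===== SOURCE A (Python) =====
-- from collections import Counter
--
-- def customs(data):
--     count = 0
--     for group in data:
--         showcount = Counter()
--         showcount.update(group)
--         group = group.split(' ')
--         for char in showcount:
--             if showcount[char] == len(group):
--                 count += 1
--     return count
-- ===== SOURCE B (Python) =====
-- def customs(data):
--     # Sort each group's characters so equal answers are adjacent, then scan runs:
--     # a run whose length equals the number of people is an everyone-answered question.
--     total = 0
--     for group in data:
--         people = len(group.split(' '))
--         s = sorted(group)
--         while s:
--             c = s[0]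
--             run = 1
--             while run < len(s) and s[run] == c:
--                 run += 1
--             if run == people:
--                 total += 1
--             s = s[run:]
--     return total
-- ===== Notes on version B (the rewrite author's own statement) =====
-- stated objective: alternative
-- what changed: Replaces the per-group Counter dictionary and key iteration with sorting the group's characters and scanning maximal runs, counting runs whose length equals the people count.
import Mathlib
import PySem

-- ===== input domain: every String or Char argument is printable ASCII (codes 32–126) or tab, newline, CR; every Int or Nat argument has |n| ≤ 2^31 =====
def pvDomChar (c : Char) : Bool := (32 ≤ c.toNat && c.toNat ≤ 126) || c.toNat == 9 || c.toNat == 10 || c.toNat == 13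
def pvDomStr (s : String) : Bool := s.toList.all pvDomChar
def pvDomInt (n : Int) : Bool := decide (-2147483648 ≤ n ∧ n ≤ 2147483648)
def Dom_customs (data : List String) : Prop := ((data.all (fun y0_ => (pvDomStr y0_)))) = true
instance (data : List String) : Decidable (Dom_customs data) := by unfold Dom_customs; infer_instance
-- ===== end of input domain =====

-- B replaces A's per-group Counter with sort-then-run-scan (alternative algorithm, same results).
-- ===== PORT A =====
def customs (data : List String) : Int :=
  data.foldl (fun count group =>
    let showcount := PySem.Dict.counter group.toList
    let parts := PySem.Chars.splitOn group.toList " ".toList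
    showcount.keys.foldl
      (fun c ch => if showcount.getD ch 0 = (parts.length : Int) then c + 1 else c)
      count) 0

-- ===== PORT B =====
-- the 'while s:' loop of Source B: the inner while measures the maximal run of s[0], s = s[run:]
def runScan (n : Nat) : List Char → Int
  | [] => 0
  | c :: rest =>
      (if 1 + (rest.takeWhile (· == c)).length = n then 1 else 0)
        + runScan n (rest.dropWhile (· == c))
termination_by s => s.length
decreasing_by
  simp only [List.length_cons]
  exact Nat.lt_succ_of_le (List.length_dropWhile_le _ _)

def customs_alt (data : List String) : Int :=
  data.foldl (fun total group =>
    let people := (PySem.Chars.splitOn group.toList " ".toList).length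
    total + runScan people (PySem.List.sorted group.toList (fun c => c) false)) 0

-- ===== PRECONDITION & SPEC =====
def Spec_customs (data : List String) (out : Int) : Prop := out = customs_alt data
instance (data : List String) (out : Int) : Decidable (Spec_customs data out) := by unfold Spec_customs; infer_instance

-- ===== CLAIM (what is proved, stated in full; the proofs are below) =====
def Claim_equal_customs : Prop := ∀ (data : List String), Dom_customs data → Spec_customs data (customs data)

-- ===== LEMMAS AND PROOFS =====

-- number of distinct characters of l occurring exactly n times, as an Int
def distinctWithCount (l : List Char) (n : Nat) : Int :=
  ((l.toFinset.filter (fun c => l.count c = n)).card : Int)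

theorem countP_eq_card (k l : List Char) (hnd : k.Nodup)
    (hm : ∀ x, x ∈ k ↔ x ∈ l) (p : Char → Bool) :
    (k.countP p : Int) = ((l.toFinset.filter (fun x => p x = true)).card : Int) := by
  have h1 : k.countP p = (k.filter p).length := List.countP_eq_length_filter
  have h2 : (k.filter p).toFinset = l.toFinset.filter (fun x => p x = true) := by
    ext x
    simp [hm]
  have h3 : (k.filter p).toFinset.card = (k.filter p).length :=
    List.toFinset_card_of_nodup (hnd.filter p)
  rw [h1, ← h3, h2]

theorem foldl_if_count (p : Char → Prop) [DecidablePred p] (keys : List Char) (acc : Int) :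
    keys.foldl (fun c ch => if p ch then c + 1 else c) acc
      = acc + (keys.countP (fun ch => decide (p ch)) : Int) := by
  induction keys generalizing acc with
  | nil => simp
  | cons ch t ih =>
      simp only [List.foldl_cons, List.countP_cons, ih]
      by_cases h : p ch
      · simp [h]; ring
      · simp [h]

theorem runScan_eq (n : Nat) (s : List Char) (hs : s.Pairwise (· ≤ ·)) :
    runScan n s = distinctWithCount s n := by
  match s with
  | [] => simp [runScan, distinctWithCount]
  | c :: rest =>
      have ht : ∀ x ∈ rest.takeWhile (· == c), x = c := by
        intro x hx
        simpa using List.mem_takeWhile_imp hx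
      have hrest : rest.takeWhile (· == c) ++ rest.dropWhile (· == c) = rest :=
        List.takeWhile_append_dropWhile
      have hrp : rest.Pairwise (· ≤ ·) := (List.pairwise_cons.mp hs).2
      have hcle : ∀ x ∈ rest, c ≤ x := (List.pairwise_cons.mp hs).1
      have hdp : (rest.dropWhile (· == c)).Pairwise (· ≤ ·) := by
        conv at hrp => rw [← hrest]
        exact (List.pairwise_append.mp hrp).2.1
      have hdc : ∀ x ∈ rest.dropWhile (· == c), x ≠ c := by
        intro x hx
        cases hdd : rest.dropWhile (· == c) with
        | nil => rw [hdd] at hx; simp at hx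
        | cons e d' =>
            have hed : (e == c) = false := by
              have h0 := List.head?_dropWhile_not (· == c) rest
              rw [hdd] at h0
              simpa using h0
            have hec : e ≠ c := by simpa using hed
            have hce : c < e := by
              have : c ≤ e := hcle e (by rw [← hrest, hdd]; simp)
              exact lt_of_le_of_ne this (Ne.symm hec)
            rw [hdd] at hx
            rcases List.mem_cons.mp hx with h | h
            · rw [h]; exact hec
            · have hdd' : (e :: d').Pairwise (· ≤ ·) := by rw [hdd] at hdp; exact hdp
              have : e ≤ x := List.rel_of_pairwise_cons hdd' h
              exact ne_of_gt (lt_of_lt_of_le hce this)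
      have hcd : c ∉ rest.dropWhile (· == c) := fun h => (hdc c h) rfl
      have hcount_c : (c :: rest).count c = 1 + (rest.takeWhile (· == c)).length := by
        conv_lhs => rw [← hrest]
        rw [List.count_cons_self, List.count_append]
        have h1 : (rest.takeWhile (· == c)).count c = (rest.takeWhile (· == c)).length :=
          List.count_eq_length.mpr (fun b hb => (ht b hb).symm)
        have h2 : (rest.dropWhile (· == c)).count c = 0 := List.count_eq_zero.mpr hcd
        omega
      have hcount_ne : ∀ x, x ≠ c → (c :: rest).count x = (rest.dropWhile (· == c)).count x := by
        intro x hx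
        conv_lhs => rw [← hrest]
        rw [List.count_cons_of_ne hx.symm, List.count_append]
        have : (rest.takeWhile (· == c)).count x = 0 :=
          List.count_eq_zero.mpr (fun h => hx (ht x h))
        omega
      have hfin : (c :: rest).toFinset = insert c (rest.dropWhile (· == c)).toFinset := by
        conv_lhs => rw [← hrest]
        ext x
        simp only [List.toFinset_cons, List.toFinset_append, Finset.mem_insert,
          Finset.mem_union, List.mem_toFinset]
        constructor
        · rintro (h | h | h)
          · exact Or.inl h
          · exact Or.inl (ht x h)
          · exact Or.inr h
        · rintro (h | h)
          · exact Or.inl h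
          · exact Or.inr (Or.inr h)
      have hfilter : ((rest.dropWhile (· == c)).toFinset.filter (fun x => (c :: rest).count x = n))
          = (rest.dropWhile (· == c)).toFinset.filter
              (fun x => (rest.dropWhile (· == c)).count x = n) := by
        apply Finset.filter_congr
        intro x hx
        rw [hcount_ne x (hdc x (List.mem_toFinset.mp hx))]
      have ihd := runScan_eq n (rest.dropWhile (· == c)) hdp
      rw [runScan, ihd]
      unfold distinctWithCount
      rw [hfin, Finset.filter_insert]
      by_cases hn : 1 + (rest.takeWhile (· == c)).length = n
      · rw [if_pos hn, if_pos (by rw [hcount_c]; exact hn)]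
        rw [Finset.card_insert_of_notMem (by simp [hcd]), hfilter]
        push_cast; ring
      · rw [if_neg hn, if_neg (by rw [hcount_c]; exact hn), hfilter]
        ring
termination_by s.length
decreasing_by
  simp only [List.length_cons]
  exact Nat.lt_succ_of_le (List.length_dropWhile_le _ _)

theorem perGroup_A (group : String) (acc : Int) :
    (PySem.Dict.counter group.toList).keys.foldl
      (fun c ch =>
        if (PySem.Dict.counter group.toList).getD ch 0
            = ((PySem.Chars.splitOn group.toList " ".toList).length : Int)
        then c + 1 else c) acc
      = acc + distinctWithCount group.toList
          (PySem.Chars.splitOn group.toList " ".toList).length := by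
  rw [foldl_if_count]
  congr 1
  rw [PySem.Dict.keys_counter]
  have hc := countP_eq_card (PySem.Set.ofList group.toList) group.toList
    (PySem.Set.nodup_ofList _) (fun x => PySem.Set.mem_ofList _ _)
    (fun ch => decide ((group.toList.count ch : Int)
      = ((PySem.Chars.splitOn group.toList " ".toList).length : Int)))
  have hpred : (fun ch => decide ((PySem.Dict.counter group.toList).getD ch 0
          = ((PySem.Chars.splitOn group.toList " ".toList).length : Int)))
      = (fun ch => decide ((group.toList.count ch : Int)
          = ((PySem.Chars.splitOn group.toList " ".toList).length : Int))) := by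
    funext ch
    rw [PySem.Dict.getD_counter]
  rw [hpred, hc]
  unfold distinctWithCount
  refine congrArg _ (congrArg Finset.card (Finset.filter_congr ?_))
  intro x _
  simp

theorem perGroup_B (group : String) (acc : Int) :
    acc + runScan (PySem.Chars.splitOn group.toList " ".toList).length
        (PySem.List.sorted group.toList (fun c => c) false)
      = acc + distinctWithCount group.toList
          (PySem.Chars.splitOn group.toList " ".toList).length := by
  congr 1
  have hperm : (PySem.List.sorted group.toList (fun c => c) false).Perm group.toList :=
    PySem.List.sorted_perm ..
  rw [runScan_eq _ _ (by simpa using PySem.List.sorted_pairwise group.toList (fun c => c))]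
  unfold distinctWithCount
  rw [List.toFinset_eq_of_perm _ _ hperm]
  refine congrArg _ (congrArg Finset.card (Finset.filter_congr ?_))
  intro x _
  rw [hperm.count_eq]

theorem foldl_eq (data : List String) (acc : Int) :
    data.foldl (fun count group =>
      let showcount := PySem.Dict.counter group.toList
      let parts := PySem.Chars.splitOn group.toList " ".toList
      showcount.keys.foldl
        (fun c ch => if showcount.getD ch 0 = (parts.length : Int) then c + 1 else c)
        count) acc
    = data.foldl (fun total group =>
        total + runScan (PySem.Chars.splitOn group.toList " ".toList).length
          (PySem.List.sorted group.toList (fun c => c) false)) acc := by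
  induction data generalizing acc with
  | nil => rfl
  | cons g t ih =>
      simp only [List.foldl_cons]
      rw [ih]
      congr 1
      exact (perGroup_A g acc).trans (perGroup_B g acc).symm

-- ===== VERDICT (by name: the statement is the Claim_ definition above) =====
theorem customs_spec : Claim_equal_customs := by
  intro data _
  unfold Spec_customs customs customs_alt
  exact foldl_eq data 0
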